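-- pv_equiv track=rewrite | github.com/EmilySchoener/CS214-Website | backend/Onto.py | onto
-- ===== SOURCE A (Python) =====
-- def onto(Domain, Co_Domain, Function):
--     Onto = True
--     for i in range(0,len(Co_Domain)):
--         for j in range(0,len(Function)):
--             if Co_Domain[i] == Function[j][1]:
--              break
--             elif (j+1) == len(Function):
--                 Onto = False
--                 return Onto
--                 #break
--         if not Onto:
--             break
--     return Onto
-- ===== SOURCE B (Python) =====
-- def onto(Domain, Co_Domain, Function):
--     remaining = set(Co_Domain)
--     for pair in Function:
--         remaining.discard(pair[1])
--     return not remaining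
-- ===== Notes on version B (the rewrite author's own statement) =====
-- stated objective: alternative
-- what changed: B makes a single pass over Function, discarding each hit value from a shrinking set of still-uncovered codomain elements, and returns whether that set emptied; A instead rescans Function from the start for every codomain element with index bookkeeping and an early-return flag.
-- intended difference: When Function is empty and Co_Domain is nonempty, A returns True because its inner loop never runs, but an empty function hits no codomain value, so B's False is the intended answer. — e.g. on onto([], [1], []): A returns true, B returns false
import Mathlib
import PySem

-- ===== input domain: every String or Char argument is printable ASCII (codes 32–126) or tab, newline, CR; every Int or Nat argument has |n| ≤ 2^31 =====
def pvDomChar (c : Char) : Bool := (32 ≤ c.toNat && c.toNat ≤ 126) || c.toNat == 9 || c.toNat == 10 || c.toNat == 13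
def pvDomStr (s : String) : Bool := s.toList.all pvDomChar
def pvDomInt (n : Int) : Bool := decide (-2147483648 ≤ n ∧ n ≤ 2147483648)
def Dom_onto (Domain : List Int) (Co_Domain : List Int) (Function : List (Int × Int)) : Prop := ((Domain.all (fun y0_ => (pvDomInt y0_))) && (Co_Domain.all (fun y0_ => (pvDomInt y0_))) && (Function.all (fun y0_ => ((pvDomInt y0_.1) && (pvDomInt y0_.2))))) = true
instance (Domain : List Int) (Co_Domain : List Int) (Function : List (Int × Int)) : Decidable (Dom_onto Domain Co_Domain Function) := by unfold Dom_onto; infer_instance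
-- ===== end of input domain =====

-- B makes one pass over Function, discarding hit values from a shrinking set of
-- still-uncovered codomain elements, instead of A's per-element rescan of Function;
-- on empty Function with nonempty codomain A returns True while B returns the
-- intended False (see D_onto).

-- ===== PORT A =====
-- inner 'for j' loop over the remaining suffix of Function: true = break (value found,
-- or the loop body never ran because Function is empty), false = the Python 'return False'
-- (rest = [] corresponds to Python's '(j+1) == len(Function)')
def ontoInnerA (c : Int) : List (Int × Int) → Bool
  | [] => true
  | p :: rest => if c = p.2 then true else if rest = [] then false else ontoInnerA c rest

-- outer 'for i' loop over Co_Domain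
def ontoOuterA (Co_Domain : List Int) (Function : List (Int × Int)) : Bool :=
  match Co_Domain with
  | [] => true
  | c :: rest => if ontoInnerA c Function then ontoOuterA rest Function else false

def onto (Domain : List Int) (Co_Domain : List Int) (Function : List (Int × Int)) : Bool :=
  ontoOuterA Co_Domain Function

-- ===== PORT B =====
def onto_alt (Domain : List Int) (Co_Domain : List Int) (Function : List (Int × Int)) : Bool :=
  let remaining : PySem.Set Int :=
    Function.foldl (fun s p => PySem.Set.discard s p.2) (PySem.Set.ofList Co_Domain)
  remaining.isEmpty

-- ===== PRECONDITION & SPEC =====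
-- When Function is empty and Co_Domain is nonempty, A returns True because its inner loop
-- never runs, but an empty function hits no codomain value, so B's False is intended.
def D_onto (Domain : List Int) (Co_Domain : List Int) (Function : List (Int × Int)) : Prop :=
  Function = [] ∧ Co_Domain ≠ []
instance (Domain : List Int) (Co_Domain : List Int) (Function : List (Int × Int)) : Decidable (D_onto Domain Co_Domain Function) := by unfold D_onto; infer_instance

def Spec_onto (Domain : List Int) (Co_Domain : List Int) (Function : List (Int × Int)) (out : Bool) : Prop := ¬ D_onto Domain Co_Domain Function → out = onto_alt Domain Co_Domain Function
instance (Domain : List Int) (Co_Domain : List Int) (Function : List (Int × Int)) (out : Bool) : Decidable (Spec_onto Domain Co_Domain Function out) := by unfold Spec_onto; infer_instance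

def pvDiffWitness_onto : List Int × List Int × (List (Int × Int)) := ([], [1], [])
def pvDiffWitnessOut_onto : Bool × Bool := (true, false)

-- ===== CLAIM =====
def Claim_unchanged_onto : Prop := ∀ (Domain : List Int) (Co_Domain : List Int) (Function : List (Int × Int)), Dom_onto Domain Co_Domain Function → Spec_onto Domain Co_Domain Function (onto Domain Co_Domain Function)
def Claim_changed_onto : Prop := Dom_onto (pvDiffWitness_onto.1) (pvDiffWitness_onto.2.1) (pvDiffWitness_onto.2.2) ∧ D_onto (pvDiffWitness_onto.1) (pvDiffWitness_onto.2.1) (pvDiffWitness_onto.2.2) ∧ onto (pvDiffWitness_onto.1) (pvDiffWitness_onto.2.1) (pvDiffWitness_onto.2.2) = pvDiffWitnessOut_onto.1 ∧ onto_alt (pvDiffWitness_onto.1) (pvDiffWitness_onto.2.1) (pvDiffWitness_onto.2.2) = pvDiffWitnessOut_onto.2 ∧ pvDiffWitnessOut_onto.1 ≠ pvDiffWitnessOut_onto.2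
def Claim_exact_onto : Prop := ∀ (Domain : List Int) (Co_Domain : List Int) (Function : List (Int × Int)), Dom_onto Domain Co_Domain Function → D_onto Domain Co_Domain Function → onto Domain Co_Domain Function ≠ onto_alt Domain Co_Domain Function

-- ===== LEMMAS AND PROOFS =====
-- On a nonempty Function, A's inner loop decides membership of c among second components.
theorem ontoInnerA_eq_mem (c : Int) (fn : List (Int × Int)) (h : fn ≠ []) :
    ontoInnerA c fn = decide (c ∈ fn.map (fun p => p.2)) := by
  induction fn with
  | nil => exact absurd rfl h
  | cons p rest ih =>
    simp only [ontoInnerA, List.map_cons, List.mem_cons]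
    by_cases hc : c = p.2
    · simp [hc]
    · rcases rest with _ | ⟨q, rest'⟩
      · simp [hc]
      · simp only [if_neg hc, if_neg (by simp : ¬(q :: rest' = ([] : List (Int × Int))))]
        rw [ih (by simp)]
        exact (decide_eq_decide.mpr (by simp [hc])).symm

theorem ontoOuterA_eq (Co : List Int) (fn : List (Int × Int)) (h : fn ≠ []) :
    ontoOuterA Co fn = Co.all (fun c => decide (c ∈ fn.map (fun p => p.2))) := by
  induction Co with
  | nil => rfl
  | cons c rest ih =>
    simp only [ontoOuterA, List.all_cons, ontoInnerA_eq_mem c fn h]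
    by_cases hc : c ∈ fn.map (fun p => p.2) <;> simp [hc, ih]

theorem ontoOuterA_empty_fn (Co : List Int) : ontoOuterA Co [] = true := by
  induction Co with
  | nil => rfl
  | cons c rest ih => simpa [ontoOuterA, ontoInnerA] using ih

-- membership after B's discard-fold: x survives iff it started in s and is hit by no pair
theorem mem_foldl_discard (fn : List (Int × Int)) (s : PySem.Set Int) (x : Int) :
    x ∈ fn.foldl (fun s p => PySem.Set.discard s p.2) s ↔ x ∈ s ∧ x ∉ fn.map (fun p => p.2) := by
  induction fn generalizing s with
  | nil => simp
  | cons p rest ih =>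
    simp only [List.foldl_cons, ih, PySem.Set.mem_discard, List.map_cons, List.mem_cons]
    tauto

-- ===== VERDICT =====
theorem onto_spec : Claim_unchanged_onto := by
  intro Domain Co fn _ hnd
  unfold onto onto_alt
  rcases fn with _ | ⟨p, fn'⟩
  · have hco : Co = [] := by
      by_contra hco
      exact hnd ⟨rfl, hco⟩
    subst hco; rfl
  · rw [ontoOuterA_eq Co (p :: fn') (by simp)]
    rw [Bool.eq_iff_iff]
    simp only [List.all_eq_true, decide_eq_true_eq, List.isEmpty_iff,
      List.eq_nil_iff_forall_not_mem, mem_foldl_discard, PySem.Set.mem_ofList, not_and, not_not]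

theorem onto_changed : Claim_changed_onto := by unfold Claim_changed_onto; decide

theorem onto_tight : Claim_exact_onto := by
  intro Domain Co fn _ hd
  rcases hd with ⟨hfn, hco⟩
  subst hfn
  unfold onto onto_alt
  rw [ontoOuterA_empty_fn]
  rcases Co with _ | ⟨c, rest⟩
  · exact absurd rfl hco
  · simp [PySem.Set.ofList_cons, List.isEmpty]
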